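-- pv_equiv track=rewrite | github.com/oronaminc/Programmers | [DP]서울에서 경산까지.py | solution
-- ===== SOURCE A (Python) =====
-- def solution(K, travel):
--     Answer=[[0 for i in range(K+1)] for j in range(len(travel)+1)]
--
--     for i in range(1,len(travel)+1):
--         [Wtime,Wmoney,Btime,Bmoney]=travel[i-1]
--         for j in range(K+1):
--             walk,bike=-1,-1
--             if j>=Wtime and Answer[i-1][j-Wtime]!=-1: walk=Answer[i-1][j-Wtime]+Wmoney
--             if j>=Btime and Answer[i-1][j-Btime]!=-1: bike=Answer[i-1][j-Btime]+Bmoney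
--             Answer[i][j]=max(walk,bike)
--
--     return  Answer[len(travel)][K]
-- ===== SOURCE B (Python) =====
-- def solution(K, travel):
--     # Demand-driven sparse DP: first find which time budgets can actually be
--     # reached at each level (top-down demand analysis), then evaluate the DP
--     # bottom-up only on those cells, keeping them in dicts keyed by budget.
--     n = len(travel)
--     needed = [set() for _ in range(n + 1)]
--     needed[n].add(K)
--     for i in range(n, 0, -1):
--         wt, wm, bt, bm = travel[i - 1]
--         for j in needed[i]:
--             if j >= wt:
--                 needed[i - 1].add(j - wt)
--             if j >= bt:
--                 needed[i - 1].add(j - bt)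
--     val = {j: 0 for j in needed[0]}
--     for i in range(1, n + 1):
--         wt, wm, bt, bm = travel[i - 1]
--         nv = {}
--         for j in needed[i]:
--             walk = val[j - wt] + wm if j >= wt and val[j - wt] != -1 else -1
--             bike = val[j - bt] + bm if j >= bt and val[j - bt] != -1 else -1
--             nv[j] = max(walk, bike)
--         val = nv
--     return val[K]
-- ===== Notes on version B (the rewrite author's own statement) =====
-- stated objective: alternative
-- what changed: Replaces A's dense (len(travel)+1)x(K+1) table filled by nested loops with a demand-driven sparse DP: a top-down pass computes the set of reachable time budgets at each level, then a bottom-up pass evaluates the recurrence only on those cells, kept in dicts keyed by budget.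
import Mathlib
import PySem

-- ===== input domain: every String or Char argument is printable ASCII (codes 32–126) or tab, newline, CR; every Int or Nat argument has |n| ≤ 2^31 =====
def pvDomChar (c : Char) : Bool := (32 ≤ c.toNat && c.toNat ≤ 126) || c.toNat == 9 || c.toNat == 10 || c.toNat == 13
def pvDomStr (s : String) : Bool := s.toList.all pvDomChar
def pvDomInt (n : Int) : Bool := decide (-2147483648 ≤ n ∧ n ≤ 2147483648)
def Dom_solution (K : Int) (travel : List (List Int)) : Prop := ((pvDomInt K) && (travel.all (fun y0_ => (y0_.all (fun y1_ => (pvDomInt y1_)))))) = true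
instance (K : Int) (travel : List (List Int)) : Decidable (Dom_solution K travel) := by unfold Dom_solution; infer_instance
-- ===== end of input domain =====

-- B replaces A's dense (len(travel)+1)×(K+1) table by a demand-driven sparse DP:
-- a top-down pass computes which time budgets are reachable at each level, then a
-- bottom-up pass evaluates the DP only on those cells, kept in dicts (objective: alternative).

-- ===== PORT A =====
-- the body of A's 'for i in range(1, len(travel)+1)' loop
-- (list unpacking '[Wtime,Wmoney,Btime,Bmoney]=travel[i-1]' and every index is ported
--  with pyGetD; under Pre_solution each index is in range and each row has length 4 —
--  outside Pre_solution the Python raises, so the defaults are never the value of A)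
def aStep (K : Int) (travel : List (List Int)) (Ans : List (List Int)) (i : Int) : List (List Int) :=
  let row := PySem.List.pyGetD travel (i - 1) []
  let Wtime := PySem.List.pyGetD row 0 0
  let Wmoney := PySem.List.pyGetD row 1 0
  let Btime := PySem.List.pyGetD row 2 0
  let Bmoney := PySem.List.pyGetD row 3 0
  let prev := PySem.List.pyGetD Ans (i - 1) []
  let newRow := (PySem.List.pyRange 0 (K + 1) 1).map (fun j =>
    let walk : Int := if Wtime ≤ j ∧ PySem.List.pyGetD prev (j - Wtime) 0 ≠ -1
                      then PySem.List.pyGetD prev (j - Wtime) 0 + Wmoney else -1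
    let bike : Int := if Btime ≤ j ∧ PySem.List.pyGetD prev (j - Btime) 0 ≠ -1
                      then PySem.List.pyGetD prev (j - Btime) 0 + Bmoney else -1
    max walk bike)
  Ans.set i.toNat newRow       -- in-place update of Answer[i] (all cells j = 0..K)

def solution (K : Int) (travel : List (List Int)) : Int :=
  let n : Int := (travel.length : Int)
  let Answer : List (List Int) :=
    (PySem.List.pyRange 0 (n + 1) 1).map (fun _ => (PySem.List.pyRange 0 (K + 1) 1).map (fun _ => (0 : Int)))
  let Answer := (PySem.List.pyRange 1 (n + 1) 1).foldl (aStep K travel) Answer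
  PySem.List.pyGetD (PySem.List.pyGetD Answer n []) K 0   -- Answer[len(travel)][K]

-- ===== PORT B =====
-- phase 1 inner loop: needed[i-1] built from needed[i] (Python: adds into a fresh set)
def altStepNeeded (row : List Int) (s : PySem.Set Int) : PySem.Set Int :=
  let Wtime := PySem.List.pyGetD row 0 0
  let Btime := PySem.List.pyGetD row 2 0
  s.foldl (fun acc j =>
    let acc' := if Wtime ≤ j then PySem.Set.add acc (j - Wtime) else acc
    if Btime ≤ j then PySem.Set.add acc' (j - Btime) else acc') PySem.Set.empty

-- phase 1: the list [needed[0], …, needed[n]], built from needed[n] = {K} downwards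
def altNeeds (travel : List (List Int)) (K : Int) : List (PySem.Set Int) :=
  travel.foldr (fun row acc =>
    match acc with
    | s :: _ => altStepNeeded row s :: acc
    | [] => acc)
    [PySem.Set.add PySem.Set.empty K]

-- phase 2 inner loop: nv = {j: max(walk, bike) for j in needed[i]}
-- (Python's raising lookup val[j - t] is ported as getD; under the demand invariant
--  the key is always present, so the default is never the value of B)
def altRowVals (row : List Int) (val : PySem.Dict Int Int) (s : PySem.Set Int) : PySem.Dict Int Int :=
  let Wtime := PySem.List.pyGetD row 0 0
  let Wmoney := PySem.List.pyGetD row 1 0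
  let Btime := PySem.List.pyGetD row 2 0
  let Bmoney := PySem.List.pyGetD row 3 0
  s.foldl (fun nv j =>
    let walk : Int := if Wtime ≤ j ∧ val.getD (j - Wtime) 0 ≠ -1 then val.getD (j - Wtime) 0 + Wmoney else -1
    let bike : Int := if Btime ≤ j ∧ val.getD (j - Btime) 0 ≠ -1 then val.getD (j - Btime) 0 + Bmoney else -1
    nv.insert j (max walk bike)) PySem.Dict.empty

def solution_alt (K : Int) (travel : List (List Int)) : Int :=
  let needed := altNeeds travel K
  let val0 := (needed.headD PySem.Set.empty).foldl (fun d j => PySem.Dict.insert d j 0) PySem.Dict.empty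
  let val := (travel.zip needed.tail).foldl (fun val rs => altRowVals rs.1 val rs.2) val0
  val.getD K 0   -- val[K]; K is always a key (needed[n] = {K})

-- ===== PRECONDITION & SPEC =====
-- Pre_solution is exactly where the Python A returns: K < 0 makes the final Answer[n][K]
-- an IndexError on an empty row, a row not of length 4 fails the unpacking (ValueError),
-- and a negative walk/bike time makes some index j - time exceed K (IndexError).
def Pre_solution (K : Int) (travel : List (List Int)) : Prop :=
  0 ≤ K ∧ ∀ row ∈ travel, row.length = 4 ∧ 0 ≤ row.getD 0 0 ∧ 0 ≤ row.getD 2 0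
instance (K : Int) (travel : List (List Int)) : Decidable (Pre_solution K travel) := by unfold Pre_solution; infer_instance
def pvWitness_solution : Int × List (List Int) := (3, [[1, 10, 2, 15], [2, 0, 1, 5]])

def Spec_solution (K : Int) (travel : List (List Int)) (out : Int) : Prop := out = solution_alt K travel
instance (K : Int) (travel : List (List Int)) (out : Int) : Decidable (Spec_solution K travel out) := by unfold Spec_solution; infer_instance

-- ===== CLAIM (what is proved, stated in full; the proofs are below) =====
def Claim_equal_solution : Prop := ∀ (K : Int) (travel : List (List Int)), Dom_solution K travel → Pre_solution K travel → Spec_solution K travel (solution K travel)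

-- ===== LEMMAS AND PROOFS =====

-- the shared cell recurrence: value of a cell from the previous level's value function g
def combD (row : List Int) (g : Int → Int) (j : Int) : Int :=
  let Wtime := PySem.List.pyGetD row 0 0
  let Wmoney := PySem.List.pyGetD row 1 0
  let Btime := PySem.List.pyGetD row 2 0
  let Bmoney := PySem.List.pyGetD row 3 0
  let walk : Int := if Wtime ≤ j ∧ g (j - Wtime) ≠ -1 then g (j - Wtime) + Wmoney else -1
  let bike : Int := if Btime ≤ j ∧ g (j - Btime) ≠ -1 then g (j - Btime) + Bmoney else -1
  max walk bike

-- reference value: bestR segs j = optimal money over the segments `segs` (last segment first)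
def bestR : List (List Int) → Int → Int
  | [], _ => 0
  | row :: rest, j => combD row (bestR rest) j


-- B-side value functions composed along the processed segments
def chain : List (List Int) → (Int → Int) → Int → Int
  | [], g, j => g j
  | row :: rest, g, j => chain rest (combD row g) j

-- the needed set at the level whose remaining (unprocessed) segments are `segs`
def Nd : List (List Int) → Int → PySem.Set Int
  | [], K => PySem.Set.add PySem.Set.empty K
  | row :: rest, K => altStepNeeded row (Nd rest K)

lemma altNeeds_eq_tails (travel : List (List Int)) (K : Int) :
    altNeeds travel K = travel.tails.map (fun t => Nd t K) := by
  induction travel with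
  | nil => simp [altNeeds, Nd]
  | cons row rest ih =>
    have h1 : altNeeds (row :: rest) K =
        (match altNeeds rest K with
         | s :: _ => altStepNeeded row s :: altNeeds rest K
         | [] => altNeeds rest K) := rfl
    rw [h1, ih]
    cases rest <;> simp [Nd, List.tails]

lemma get?_fold_insert (f : Int → Int) (s : List Int) (d : PySem.Dict Int Int) (x : Int) :
    (s.foldl (fun d j => d.insert j (f j)) d).get? x = if x ∈ s then some (f x) else d.get? x := by
  induction s generalizing d with
  | nil => simp
  | cons j s ih =>
    simp only [List.foldl_cons, ih, PySem.Dict.get?_insert, List.mem_cons]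
    by_cases hs : x ∈ s <;> by_cases hj : x = j <;> simp [hs, hj]

lemma mem_altStepNeeded_fold (wt bt : Int) (s : List Int) (acc : PySem.Set Int) (x : Int) :
    (x ∈ s.foldl (fun acc j =>
      let acc' := if wt ≤ j then PySem.Set.add acc (j - wt) else acc
      if bt ≤ j then PySem.Set.add acc' (j - bt) else acc') acc) ↔
    x ∈ acc ∨ ∃ j ∈ s, (wt ≤ j ∧ x = j - wt) ∨ (bt ≤ j ∧ x = j - bt) := by
  induction s generalizing acc with
  | nil => simp
  | cons j s ih =>
    simp only [List.foldl_cons, ih, List.mem_cons]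
    split_ifs with h1 h2 h2 <;> simp [PySem.Set.mem_add, h1, h2, or_assoc]

lemma mem_altStepNeeded (row : List Int) (s : PySem.Set Int) (x : Int) :
    x ∈ altStepNeeded row s ↔
    ∃ j ∈ s, (PySem.List.pyGetD row 0 0 ≤ j ∧ x = j - PySem.List.pyGetD row 0 0) ∨
             (PySem.List.pyGetD row 2 0 ≤ j ∧ x = j - PySem.List.pyGetD row 2 0) := by
  unfold altStepNeeded
  rw [mem_altStepNeeded_fold]
  simp [PySem.Set.empty]

lemma combD_congr (row : List Int) (g1 g2 : Int → Int) (j : Int)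
    (hw : PySem.List.pyGetD row 0 0 ≤ j → g1 (j - PySem.List.pyGetD row 0 0) = g2 (j - PySem.List.pyGetD row 0 0))
    (hb : PySem.List.pyGetD row 2 0 ≤ j → g1 (j - PySem.List.pyGetD row 2 0) = g2 (j - PySem.List.pyGetD row 2 0)) :
    combD row g1 j = combD row g2 j := by
  have e1 : ∀ (g1 g2 : Int → Int) (t m : Int), (t ≤ j → g1 (j - t) = g2 (j - t)) →
      ((if t ≤ j ∧ g1 (j - t) ≠ -1 then g1 (j - t) + m else -1) =
       (if t ≤ j ∧ g2 (j - t) ≠ -1 then g2 (j - t) + m else -1)) := by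
    intro g1 g2 t m h
    by_cases ht : t ≤ j
    · rw [h ht]
    · simp [ht]
  unfold combD
  dsimp only
  rw [e1 g1 g2 _ _ hw, e1 g1 g2 _ _ hb]

lemma altRowVals_eq_fold (row : List Int) (val : PySem.Dict Int Int) (s : PySem.Set Int) :
    altRowVals row val s =
      s.foldl (fun nv j => nv.insert j (combD row (fun t => val.getD t 0) j)) PySem.Dict.empty := rfl

lemma B_fold (segs : List (List Int)) (K : Int) (g : Int → Int) (val : PySem.Dict Int Int)
    (h : ∀ j ∈ Nd segs K, val.get? j = some (g j)) :
    ((segs.zip ((altNeeds segs K).tail)).foldl (fun v rs => altRowVals rs.1 v rs.2) val).get? K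
      = some (chain segs g K) := by
  induction segs generalizing g val with
  | nil =>
    simp only [List.zip_nil_left, List.foldl_nil, chain]
    exact h K (by simp [Nd, PySem.Set.add, PySem.Set.empty])
  | cons row rest ih =>
    have htails : (altNeeds (row :: rest) K).tail = altNeeds rest K := by
      rw [altNeeds_eq_tails, altNeeds_eq_tails]
      simp [List.tails]
    have hhead : altNeeds rest K = Nd rest K :: (altNeeds rest K).tail := by
      rw [altNeeds_eq_tails]
      cases rest <;> simp [List.tails]
    rw [htails, hhead]
    simp only [List.zip_cons_cons, List.foldl_cons]
    apply ih (g := combD row g)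
    intro j hj
    rw [altRowVals_eq_fold, get?_fold_insert, if_pos hj]
    congr 1
    apply combD_congr
    · intro hw
      rw [PySem.Dict.getD_eq_get?_getD,
        h _ (by rw [Nd, mem_altStepNeeded]; exact ⟨j, hj, Or.inl ⟨hw, rfl⟩⟩)]
      rfl
    · intro hb
      rw [PySem.Dict.getD_eq_get?_getD,
        h _ (by rw [Nd, mem_altStepNeeded]; exact ⟨j, hj, Or.inr ⟨hb, rfl⟩⟩)]
      rfl

lemma chain_bestR (segs : List (List Int)) : ∀ (pref : List (List Int)) (j : Int),
    chain segs (bestR pref) j = bestR (segs.reverse ++ pref) j := by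
  induction segs with
  | nil => intro pref j; simp [chain]
  | cons row rest ih =>
    intro pref j
    have h1 : combD row (bestR pref) = bestR (row :: pref) := by
      funext t; simp [bestR]
    rw [chain, h1, ih (row :: pref) j]
    simp

lemma solution_alt_eq_bestR (K : Int) (travel : List (List Int)) :
    solution_alt K travel = bestR travel.reverse K := by
  unfold solution_alt
  have hhead : (altNeeds travel K).headD PySem.Set.empty = Nd travel K := by
    rw [altNeeds_eq_tails]; cases travel <;> simp [List.tails]
  have h0 : ∀ j ∈ Nd travel K,
      (((altNeeds travel K).headD PySem.Set.empty).foldl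
        (fun d j => PySem.Dict.insert d j 0) PySem.Dict.empty).get? j = some (bestR [] j) := by
    intro j hj
    have : (fun (d : PySem.Dict Int Int) (j : Int) => PySem.Dict.insert d j 0) =
        fun d j => d.insert j ((fun _ => (0 : Int)) j) := rfl
    rw [hhead, this, get?_fold_insert, if_pos hj]
    simp [bestR]
  have := B_fold travel K (bestR []) _ h0
  rw [PySem.Dict.getD_eq_get?_getD, this]
  have := chain_bestR travel [] K
  simp only [List.append_nil] at this
  rw [this]
  rfl


-- ----- A side -----

lemma ifpair_congr (t m j : Int) (g1 g2 : Int → Int) (h : t ≤ j → g1 (j - t) = g2 (j - t)) :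
    (if t ≤ j ∧ g1 (j - t) ≠ -1 then g1 (j - t) + m else -1) =
    (if t ≤ j ∧ g2 (j - t) ≠ -1 then g2 (j - t) + m else -1) := by
  by_cases ht : t ≤ j
  · rw [h ht]
  · simp [ht]

-- row i of A's table, as the reference function over the first i segments
def rowPure (K : Int) (travel : List (List Int)) (i : Nat) : List Int :=
  (PySem.List.pyRange 0 (K + 1) 1).map (fun j => bestR ((travel.take i).reverse) j)

lemma pyGetD_rowPure (K : Int) (travel : List (List Int)) (i : Nat) (t : Int)
    (h0 : 0 ≤ t) (h1 : t < K + 1) :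
    PySem.List.pyGetD (rowPure K travel i) t 0 = bestR ((travel.take i).reverse) t :=
  PySem.List.pyGetD_map_pyRange_of_nonneg _ _ _ _ h0 h1

-- A's table after the first i iterations of the outer loop
def tblA (K : Int) (travel : List (List Int)) (i : Nat) : List (List Int) :=
  (PySem.List.pyRange 1 ((i : Int) + 1) 1).foldl (aStep K travel)
    ((PySem.List.pyRange 0 ((travel.length : Int) + 1) 1).map
      (fun _ => (PySem.List.pyRange 0 (K + 1) 1).map (fun _ => (0 : Int))))

lemma tblA_zero (K : Int) (travel : List (List Int)) :
    tblA K travel 0 =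
      (PySem.List.pyRange 0 ((travel.length : Int) + 1) 1).map
        (fun _ => (PySem.List.pyRange 0 (K + 1) 1).map (fun _ => (0 : Int))) := by
  unfold tblA
  rw [PySem.List.pyRange_one_eq_nil (a := 1) (b := ((0 : Nat) : Int) + 1) (by simp)]
  rfl

lemma tblA_succ (K : Int) (travel : List (List Int)) (i : Nat) :
    tblA K travel (i + 1) = aStep K travel (tblA K travel i) ((i : Int) + 1) := by
  unfold tblA
  have hc : ((i + 1 : Nat) : Int) + 1 = ((i : Int) + 1) + 1 := by push_cast; ring
  rw [hc, PySem.List.pyRange_one_succ_right (a := 1) (b := (i : Int) + 1) (by omega),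
    List.foldl_append]
  simp

lemma tblA_inv (K : Int) (travel : List (List Int))
    (hrows : ∀ row ∈ travel, 0 ≤ row.getD 0 0 ∧ 0 ≤ row.getD 2 0) :
    ∀ i, i ≤ travel.length →
      (tblA K travel i).length = travel.length + 1 ∧
      (tblA K travel i)[i]? = some (rowPure K travel i) := by
  intro i
  induction i with
  | zero =>
    intro _
    rw [tblA_zero]
    constructor
    · simp [PySem.List.length_pyRange_one]
    · rw [PySem.List.pyRange_one_cons (a := 0) (b := (travel.length : Int) + 1) (by omega)]
      simp only [List.map_cons, List.getElem?_cons_zero]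
      unfold rowPure
      exact congrArg some (List.map_congr_left (fun j _ => by simp [bestR]))
  | succ i ih =>
    intro hi
    have hilt : i < travel.length := by omega
    obtain ⟨hlen, hget⟩ := ih (by omega)
    rw [tblA_succ]
    unfold aStep
    dsimp only
    have e1 : ((i : Int) + 1) - 1 = (i : Int) := by ring
    have hprev : PySem.List.pyGetD (tblA K travel i) ((i : Int) + 1 - 1) [] = rowPure K travel i := by
      rw [e1, PySem.List.pyGetD_natCast, List.getD_eq_getElem?_getD, hget]
      rfl
    have hrow : PySem.List.pyGetD travel ((i : Int) + 1 - 1) [] = travel[i] := by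
      rw [e1, PySem.List.pyGetD_natCast, List.getD_eq_getElem?_getD, List.getElem?_eq_getElem hilt]
      rfl
    have htoNat : ((i : Int) + 1).toNat = i + 1 := by omega
    rw [hprev, hrow, htoNat]
    refine ⟨by simpa using hlen, ?_⟩
    rw [List.getElem?_set_self (by omega)]
    congr 1
    have hrp : rowPure K travel (i + 1) =
        (PySem.List.pyRange 0 (K + 1) 1).map (fun j => bestR ((travel.take (i + 1)).reverse) j) := rfl
    rw [hrp]
    apply List.map_congr_left
    intro j hj
    rw [PySem.List.mem_pyRange_one] at hj
    have htake : (travel.take (i + 1)).reverse = travel[i] :: (travel.take i).reverse := by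
      rw [List.take_add_one, List.getElem?_eq_getElem hilt]
      simp
    have h0 : 0 ≤ travel[i].getD 0 0 ∧ 0 ≤ travel[i].getD 2 0 :=
      hrows _ (List.getElem_mem hilt)
    rw [htake]
    show _ = combD travel[i] (bestR ((travel.take i).reverse)) j
    unfold combD
    dsimp only
    have hw : PySem.List.pyGetD travel[i] 0 0 ≤ j →
        PySem.List.pyGetD (rowPure K travel i) (j - PySem.List.pyGetD travel[i] 0 0) 0 =
        bestR ((travel.take i).reverse) (j - PySem.List.pyGetD travel[i] 0 0) := by
      intro ht
      have h00 : PySem.List.pyGetD travel[i] 0 0 = travel[i].getD 0 0 := by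
        simpa using PySem.List.pyGetD_ofNat' travel[i] 0 0
      apply pyGetD_rowPure <;> omega
    have hb : PySem.List.pyGetD travel[i] 2 0 ≤ j →
        PySem.List.pyGetD (rowPure K travel i) (j - PySem.List.pyGetD travel[i] 2 0) 0 =
        bestR ((travel.take i).reverse) (j - PySem.List.pyGetD travel[i] 2 0) := by
      intro ht
      have h02 : PySem.List.pyGetD travel[i] 2 0 = travel[i].getD 2 0 := by
        simpa using PySem.List.pyGetD_ofNat' travel[i] 2 0
      apply pyGetD_rowPure <;> omega
    rw [ifpair_congr (PySem.List.pyGetD travel[i] 0 0) (PySem.List.pyGetD travel[i] 1 0) j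
          (fun t => PySem.List.pyGetD (rowPure K travel i) t 0)
          (bestR ((travel.take i).reverse)) hw,
        ifpair_congr (PySem.List.pyGetD travel[i] 2 0) (PySem.List.pyGetD travel[i] 3 0) j
          (fun t => PySem.List.pyGetD (rowPure K travel i) t 0)
          (bestR ((travel.take i).reverse)) hb]

lemma solution_eq_bestR (K : Int) (travel : List (List Int)) (hK : 0 ≤ K)
    (hrows : ∀ row ∈ travel, 0 ≤ row.getD 0 0 ∧ 0 ≤ row.getD 2 0) :
    solution K travel = bestR travel.reverse K := by
  unfold solution
  dsimp only
  obtain ⟨hlen, hget⟩ := tblA_inv K travel hrows travel.length le_rfl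
  have hfold : (PySem.List.pyRange 1 ((travel.length : Int) + 1) 1).foldl (aStep K travel)
      ((PySem.List.pyRange 0 ((travel.length : Int) + 1) 1).map
        (fun _ => (PySem.List.pyRange 0 (K + 1) 1).map (fun _ => (0 : Int))))
      = tblA K travel travel.length := rfl
  rw [hfold, PySem.List.pyGetD_natCast, List.getD_eq_getElem?_getD, hget]
  show PySem.List.pyGetD (rowPure K travel travel.length) K 0 = _
  rw [pyGetD_rowPure K travel _ K hK (by omega)]
  rw [List.take_length]

-- ===== VERDICT (by name: the statement is the Claim_ definition above) =====
theorem solution_spec : Claim_equal_solution := by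
  intro K travel _ hpre
  unfold Spec_solution
  rw [solution_alt_eq_bestR, solution_eq_bestR K travel hpre.1
    (fun row hr => ⟨(hpre.2 row hr).2.1, (hpre.2 row hr).2.2⟩)]
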